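-- pv_equiv track=rewrite | github.com/aqemery/advent-of-code | 2024/22.py | part2
-- ===== SOURCE A (Python) =====
-- from collections import defaultdict
--
-- def next_secret(s):
--     s = ((s * 64) ^ s) % 16777216
--     s = ((s // 32) ^ s) % 16777216
--     s = ((s * 2048) ^ s) % 16777216
--     return s
--
-- def part2(secrets):
--     sequence_totals = defaultdict(int)
--
--     for initial in secrets:
--         s = initial
--         prices = [s % 10]
--         for _ in range(2000):
--             s = next_secret(s)
--             prices.append(s % 10)
--
--         changes = [prices[i] - prices[i-1] for i in range(1, len(prices))]
--
--         seen = set()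
--         for i in range(len(changes) - 3):
--             seq = tuple(changes[i:i+4])
--             if seq not in seen:
--                 seen.add(seq)
--                 sequence_totals[seq] += prices[i + 4]
--
--     return max(sequence_totals.values())
-- ===== SOURCE B (Python) =====
-- def next_secret(s):
--     s = ((s * 64) ^ s) % 16777216
--     s = ((s // 32) ^ s) % 16777216
--     s = ((s * 2048) ^ s) % 16777216
--     return s
--
--
-- def part2(secrets):
--     # One streaming pass per seed: no prices/changes lists, no slicing.
--     # Keep the previous price and a rolling window of the last three changes.
--     totals = {}
--     for s in secrets:
--         seen = set()
--         prev = s % 10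
--         c1 = c2 = c3 = 0
--         for step in range(2000):
--             s = next_secret(s)
--             p = s % 10
--             c = p - prev
--             prev = p
--             if step >= 3:
--                 key = (c1, c2, c3, c)
--                 if key not in seen:
--                     seen.add(key)
--                     totals[key] = totals.get(key, 0) + p
--             c1, c2, c3 = c2, c3, c
--     return max(totals.values())
-- ===== Notes on version B (the rewrite author's own statement) =====
-- stated objective: alternative
-- what changed: B replaces A's per-seed materialisation of a 2001-element price list, a separate change list and per-window tuple slices by a single streaming loop per seed that keeps only the previous price and a rolling window of the last three changes, updating the global totals dict on the fly.
import Mathlib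
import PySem

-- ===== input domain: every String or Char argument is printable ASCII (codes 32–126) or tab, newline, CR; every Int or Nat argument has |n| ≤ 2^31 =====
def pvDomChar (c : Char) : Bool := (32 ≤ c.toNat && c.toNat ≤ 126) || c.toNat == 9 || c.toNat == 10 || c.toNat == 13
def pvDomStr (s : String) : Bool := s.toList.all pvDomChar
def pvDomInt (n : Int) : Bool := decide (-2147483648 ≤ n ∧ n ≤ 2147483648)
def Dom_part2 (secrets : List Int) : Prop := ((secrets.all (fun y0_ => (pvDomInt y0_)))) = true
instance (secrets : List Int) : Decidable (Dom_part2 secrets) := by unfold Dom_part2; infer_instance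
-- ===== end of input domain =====

-- B replaces A's per-seed price/change lists and tuple slices by one streaming pass per seed
-- with a rolling window of the last three changes (alternative decomposition; same asymptotic cost).

-- ===== PORT A =====
-- Internal containers: every dict/set below is consumed only through membership, get-with-default
-- and max over values (never through iteration order), so Std.HashSet/Std.HashMap model Python's
-- set/defaultdict exactly here; 'sequence_totals[seq] += v' is insert (getD seq 0 + v).
def nextSecret (s : Int) : Int :=
  let s1 := PySem.Int.mod (PySem.Int.bxor (s * 64) s) 16777216
  let s2 := PySem.Int.mod (PySem.Int.bxor (PySem.Int.floordiv s1 32) s1) 16777216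
  PySem.Int.mod (PySem.Int.bxor (s2 * 2048) s2) 16777216

-- tuple(changes[i:i+4]): the slice always has length 4 inside A's loop; (0,0,0,0) is unreachable
def tuple4 (xs : List Int) : Int × Int × Int × Int :=
  match xs with
  | [a, b, c, d] => (a, b, c, d)
  | _ => (0, 0, 0, 0)

-- the body of A's price-generating loop
def partA_priceStep (st : Int × List Int) (_ : Int) : Int × List Int :=
  let s := nextSecret st.1
  (s, st.2 ++ [PySem.Int.mod s 10])

-- the body of A's window loop
def partA_scanStep (prices changes : List Int)
    (st : Std.HashSet (Int × Int × Int × Int) × Std.HashMap (Int × Int × Int × Int) Int)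
    (i : Int) :
    Std.HashSet (Int × Int × Int × Int) × Std.HashMap (Int × Int × Int × Int) Int :=
  let seq := tuple4 (PySem.List.slice changes (some i) (some (i + 4)))
  if st.1.contains seq then st
  else (st.1.insert seq,
        st.2.insert seq (st.2.getD seq 0 + PySem.List.pyGetD prices (i + 4) 0))

-- changes = [prices[i] - prices[i-1] for i in range(1, len(prices))]
def partA_changes (prices : List Int) : List Int :=
  (PySem.List.pyRange 1 (prices.length : Int) 1).map
    (fun i => PySem.List.pyGetD prices i 0 - PySem.List.pyGetD prices (i - 1) 0)

-- A's window loop over range(len(changes) - 3), returning the updated dict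
def partA_scan (prices changes : List Int)
    (totals : Std.HashMap (Int × Int × Int × Int) Int) :
    Std.HashMap (Int × Int × Int × Int) Int :=
  ((PySem.List.pyRange 0 ((changes.length : Int) - 3) 1).foldl
      (partA_scanStep prices changes) ((Std.HashSet.emptyWithCapacity : Std.HashSet (Int × Int × Int × Int)), totals)).2

-- the body of A's 'for initial in secrets' loop
def partA_seed (totals : Std.HashMap (Int × Int × Int × Int) Int) (initial : Int) :
    Std.HashMap (Int × Int × Int × Int) Int :=
  let prices := ((PySem.List.pyRange 0 2000 1).foldl partA_priceStep
      (initial, [PySem.Int.mod initial 10])).2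
  partA_scan prices (partA_changes prices) totals

def part2 (secrets : List Int) : Int :=
  let totals := secrets.foldl partA_seed (Std.HashMap.emptyWithCapacity : Std.HashMap (Int × Int × Int × Int) Int)
  (PySem.List.max? totals.values (fun x => x)).getD 0

-- ===== PORT B =====
-- the body of B's streaming loop: state (s, prev, c1, c2, c3, seen, totals)
def partB_step
    (st : Int × Int × Int × Int × Int ×
          Std.HashSet (Int × Int × Int × Int) × Std.HashMap (Int × Int × Int × Int) Int)
    (step : Int) :
    Int × Int × Int × Int × Int ×
          Std.HashSet (Int × Int × Int × Int) × Std.HashMap (Int × Int × Int × Int) Int :=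
  match st with
  | (s, prev, c1, c2, c3, seen, totals) =>
    let s := nextSecret s
    let p := PySem.Int.mod s 10
    let c := p - prev
    let upd :=
      if 3 ≤ step then
        let key := (c1, c2, c3, c)
        if seen.contains key then (seen, totals)
        else (seen.insert key,
              totals.insert key (totals.getD key 0 + p))
      else (seen, totals)
    (s, p, c2, c3, c, upd.1, upd.2)

-- after the loop, B's per-seed result is the totals component of the final state
def partB_finish
    (st : Int × Int × Int × Int × Int ×
          Std.HashSet (Int × Int × Int × Int) × Std.HashMap (Int × Int × Int × Int) Int) :
    Std.HashMap (Int × Int × Int × Int) Int :=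
  st.2.2.2.2.2.2

-- the body of B's 'for s in secrets' loop: one streaming pass
def partB_seed (totals : Std.HashMap (Int × Int × Int × Int) Int) (s0 : Int) :
    Std.HashMap (Int × Int × Int × Int) Int :=
  partB_finish ((PySem.List.pyRange 0 2000 1).foldl partB_step
    (s0, PySem.Int.mod s0 10, 0, 0, 0, (Std.HashSet.emptyWithCapacity : Std.HashSet (Int × Int × Int × Int)), totals))

def part2_alt (secrets : List Int) : Int :=
  let totals := secrets.foldl partB_seed (Std.HashMap.emptyWithCapacity : Std.HashMap (Int × Int × Int × Int) Int)
  (PySem.List.max? totals.values (fun x => x)).getD 0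

-- ===== PRECONDITION & SPEC =====
-- Pre_ excludes only the empty list, on which Python A raises ValueError (max of an empty dict).
def Pre_part2 (secrets : List Int) : Prop := secrets ≠ []
instance (secrets : List Int) : Decidable (Pre_part2 secrets) := by unfold Pre_part2; infer_instance
def pvWitness_part2 : List Int := [1]

def Spec_part2 (secrets : List Int) (out : Int) : Prop := out = part2_alt secrets
instance (secrets : List Int) (out : Int) : Decidable (Spec_part2 secrets out) := by unfold Spec_part2; infer_instance

-- ===== CLAIM (what is proved, stated in full; the proofs are below) =====
def Claim_equal_part2 : Prop := ∀ (secrets : List Int), Dom_part2 secrets → Pre_part2 secrets → Spec_part2 secrets (part2 secrets)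

-- ===== LEMMAS AND PROOFS =====

-- the mathematical content both seed loops compute: the secret stream, its prices and changes
def secIter (s0 : Int) : Nat → Int
  | 0 => s0
  | t + 1 => nextSecret (secIter s0 t)

def priceAt (s0 : Int) (t : Nat) : Int := PySem.Int.mod (secIter s0 t) 10

def chgAt (s0 : Int) (t : Nat) : Int := priceAt s0 (t + 1) - priceAt s0 t

-- the common per-window event: first occurrence of the 4-change key adds priceAt (i+4)
def evStep (s0 : Int)
    (st : Std.HashSet (Int × Int × Int × Int) × Std.HashMap (Int × Int × Int × Int) Int)
    (i : Nat) :
    Std.HashSet (Int × Int × Int × Int) × Std.HashMap (Int × Int × Int × Int) Int :=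
  let key := (chgAt s0 i, chgAt s0 (i + 1), chgAt s0 (i + 2), chgAt s0 (i + 3))
  if st.1.contains key then st
  else (st.1.insert key,
        st.2.insert key (st.2.getD key 0 + priceAt s0 (i + 4)))

def evFold (s0 : Int) (k : Nat)
    (st : Std.HashSet (Int × Int × Int × Int) × Std.HashMap (Int × Int × Int × Int) Int) :=
  (List.range k).foldl (evStep s0) st

lemma evFold_succ (s0 : Int) (k : Nat)
    (st : Std.HashSet (Int × Int × Int × Int) × Std.HashMap (Int × Int × Int × Int) Int) :
    evFold s0 (k + 1) st = evStep s0 (evFold s0 k st) k := by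
  unfold evFold
  rw [List.range_succ, List.foldl_append]
  rfl

-- ---- A side ----

lemma pricesFold (s0 : Int) (n : Nat) :
    (List.range n).foldl (fun st (_ : Nat) => partA_priceStep st 0)
      (s0, [PySem.Int.mod s0 10])
    = (secIter s0 n, (List.range (n + 1)).map (priceAt s0)) := by
  induction n with
  | zero => simp [secIter, priceAt]
  | succ n ih =>
      rw [List.range_succ, List.foldl_append, ih]
      simp [List.range_succ, secIter, priceAt, partA_priceStep]

lemma pricesFold' (s0 : Int) :
    ((PySem.List.pyRange 0 2000 1).foldl partA_priceStep
      (s0, [PySem.Int.mod s0 10]))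
    = (secIter s0 2000, (List.range 2001).map (priceAt s0)) := by
  rw [PySem.List.pyRange_one, show ((2000:Int) - 0).toNat = 2000 from rfl, List.foldl_map]
  exact pricesFold s0 2000

lemma changesEq (s0 : Int) :
    partA_changes ((List.range 2001).map (priceAt s0))
    = (List.range 2000).map (chgAt s0) := by
  unfold partA_changes
  rw [List.length_map, List.length_range]
  rw [show (((2001:Nat)) : Int) = (2001:Int) from rfl]
  rw [PySem.List.pyRange_one, show ((2001:Int) - 1).toNat = 2000 from rfl, List.map_map]
  apply List.map_congr_left
  intro k hk
  have hk' : k < 2000 := List.mem_range.mp hk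
  simp only [Function.comp]
  rw [show (1:Int) + (k:Int) = ((k + 1 : Nat) : Int) by push_cast; ring]
  rw [show ((k + 1 : Nat) : Int) - 1 = ((k : Nat) : Int) by push_cast; ring]
  rw [PySem.List.pyGetD_natCast, PySem.List.pyGetD_natCast]
  rw [PySem.List.getD_map_range _ _ _ _ (by omega), PySem.List.getD_map_range _ _ _ _ (by omega)]
  rfl

lemma sliceChanges (s0 : Int) (k : Nat) (hk : k < 1997) :
    PySem.List.slice ((List.range 2000).map (chgAt s0)) (some (0 + (k : Int)))
        (some (0 + (k : Int) + 4))
    = [chgAt s0 k, chgAt s0 (k + 1), chgAt s0 (k + 2), chgAt s0 (k + 3)] := by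
  rw [zero_add, show ((k : Int) + 4) = ((k : Int) + ((4 : Nat) : Int)) from rfl,
      PySem.List.slice_natCast_add]
  rw [← List.map_drop, ← List.map_take]
  rw [show List.take 4 (List.drop k (List.range 2000)) = [k, k + 1, k + 2, k + 3] by
        rw [List.range_eq_range', List.drop_range']
        rw [List.take_range'_of_length_ge (by omega)]
        simp [List.range'_succ]]
  rfl

lemma scanStepEq (s0 : Int) (k : Nat) (hk : k < 1997)
    (acc : Std.HashSet (Int × Int × Int × Int) × Std.HashMap (Int × Int × Int × Int) Int) :
    partA_scanStep ((List.range 2001).map (priceAt s0)) ((List.range 2000).map (chgAt s0))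
      acc (0 + (k : Int))
    = evStep s0 acc k := by
  unfold partA_scanStep evStep
  rw [sliceChanges s0 k hk]
  rw [show (0 + (k : Int) + 4) = ((k + 4 : Nat) : Int) by push_cast; ring]
  rw [PySem.List.pyGetD_natCast, PySem.List.getD_map_range _ _ _ _ (by omega)]
  rfl

lemma scanEq (s0 : Int) (totals : Std.HashMap (Int × Int × Int × Int) Int)
    (prices changes : List Int)
    (h1 : prices = (List.range 2001).map (priceAt s0))
    (h2 : changes = (List.range 2000).map (chgAt s0)) :
    partA_scan prices changes totals = (evFold s0 1997 ((Std.HashSet.emptyWithCapacity : Std.HashSet (Int × Int × Int × Int)), totals)).2 := by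
  rw [partA_scan]
  have hlen : ((changes.length : Nat) : Int) - 3 = (1997 : Int) := by
    rw [h2, List.length_map, List.length_range]; rfl
  rw [hlen, PySem.List.pyRange_one, show ((1997:Int) - 0).toNat = 1997 from rfl, List.foldl_map]
  rw [PySem.List.foldl_congr_mem (List.range 1997) _ (evStep s0) ((Std.HashSet.emptyWithCapacity : Std.HashSet (Int × Int × Int × Int)), totals)
        (fun acc x hx => by
          rw [h1, h2]; exact scanStepEq s0 x (List.mem_range.mp hx) acc)]
  rw [evFold]

lemma pricesFold2 (s0 : Int) :
    ((PySem.List.pyRange 0 2000 1).foldl partA_priceStep (s0, [PySem.Int.mod s0 10])).2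
    = (List.range 2001).map (priceAt s0) := by
  rw [pricesFold']

lemma seedA (totals : Std.HashMap (Int × Int × Int × Int) Int) (s0 : Int) :
    partA_seed totals s0 = (evFold s0 1997 ((Std.HashSet.emptyWithCapacity : Std.HashSet (Int × Int × Int × Int)), totals)).2 := by
  rw [partA_seed]
  rw [pricesFold2]
  exact scanEq s0 totals _ _ rfl (changesEq s0)

-- ---- B side ----

-- the rolling window after t steps: wAt t j is the (j+1)-th most recent change (0 before it exists)
def wAt (s0 : Int) (t j : Nat) : Int :=
  if j + 1 ≤ t then chgAt s0 (t - (j + 1)) else 0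

def stateAt (s0 : Int) (totals : Std.HashMap (Int × Int × Int × Int) Int) (t : Nat) :
    Int × Int × Int × Int × Int ×
          Std.HashSet (Int × Int × Int × Int) × Std.HashMap (Int × Int × Int × Int) Int :=
  (secIter s0 t, priceAt s0 t, wAt s0 t 2, wAt s0 t 1, wAt s0 t 0,
   evFold s0 (t - 3) ((Std.HashSet.emptyWithCapacity : Std.HashSet (Int × Int × Int × Int)), totals))

lemma wAt_succ (s0 : Int) (t j : Nat) : wAt s0 (t + 1) (j + 1) = wAt s0 t j := by
  unfold wAt
  split_ifs with h1 h2 h2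
  · congr 1; omega
  · omega
  · omega
  · rfl

lemma wAt_succ_zero (s0 : Int) (t : Nat) : wAt s0 (t + 1) 0 = chgAt s0 t := by
  simp [wAt]

lemma bStepAt (s0 : Int) (totals : Std.HashMap (Int × Int × Int × Int) Int) (t : Nat) :
    partB_step (stateAt s0 totals t) (0 + (t : Int)) = stateAt s0 totals (t + 1) := by
  have hprev : PySem.Int.mod (nextSecret (secIter s0 t)) 10 - priceAt s0 t = chgAt s0 t := rfl
  unfold partB_step stateAt
  dsimp only
  rw [show priceAt s0 (t + 1) = PySem.Int.mod (nextSecret (secIter s0 t)) 10 from rfl,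
      show secIter s0 (t + 1) = nextSecret (secIter s0 t) from rfl,
      show wAt s0 (t + 1) 2 = wAt s0 t 1 from wAt_succ s0 t 1,
      show wAt s0 (t + 1) 1 = wAt s0 t 0 from wAt_succ s0 t 0,
      wAt_succ_zero s0 t, ← hprev]
  by_cases h3 : 3 ≤ t
  · have hc : (3 : Int) ≤ 0 + (t : Int) := by omega
    rw [if_pos hc]
    rw [show t + 1 - 3 = (t - 3) + 1 from by omega, evFold_succ]
    rw [evStep]
    have c1 : chgAt s0 (t - 3) = wAt s0 t 2 := by
      unfold wAt; rw [if_pos (show 2 + 1 ≤ t from by omega)]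
    have c2 : chgAt s0 (t - 3 + 1) = wAt s0 t 1 := by
      unfold wAt; rw [if_pos (show 1 + 1 ≤ t from by omega)]; congr 1; omega
    have c3 : chgAt s0 (t - 3 + 2) = wAt s0 t 0 := by
      unfold wAt; rw [if_pos (show 0 + 1 ≤ t from by omega)]; congr 1; omega
    have c4 : chgAt s0 (t - 3 + 3)
        = PySem.Int.mod (nextSecret (secIter s0 t)) 10 - priceAt s0 t := by
      rw [show t - 3 + 3 = t from by omega]; exact hprev.symm
    have c5 : priceAt s0 (t - 3 + 4) = PySem.Int.mod (nextSecret (secIter s0 t)) 10 := by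
      rw [show t - 3 + 4 = t + 1 from by omega]; rfl
    rw [c1, c2, c3, c4, c5]
  · have hc : ¬ (3 : Int) ≤ 0 + (t : Int) := by omega
    rw [if_neg hc, show t + 1 - 3 = t - 3 from by omega]

lemma bFold (s0 : Int) (totals : Std.HashMap (Int × Int × Int × Int) Int) (t : Nat) :
    (List.range t).foldl (fun st (x : Nat) => partB_step st (0 + (x : Int)))
      (s0, PySem.Int.mod s0 10, 0, 0, 0, (Std.HashSet.emptyWithCapacity : Std.HashSet (Int × Int × Int × Int)), totals)
    = stateAt s0 totals t := by
  induction t with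
  | zero =>
      simp only [List.range_zero, List.foldl_nil]
      simp [stateAt, wAt, evFold, secIter, priceAt]
  | succ t ih =>
      rw [List.range_succ, List.foldl_append, ih]
      simpa using bStepAt s0 totals t

lemma seedB (totals : Std.HashMap (Int × Int × Int × Int) Int) (s0 : Int) :
    partB_seed totals s0 = (evFold s0 1997 ((Std.HashSet.emptyWithCapacity : Std.HashSet (Int × Int × Int × Int)), totals)).2 := by
  rw [partB_seed]
  rw [PySem.List.pyRange_one, show ((2000:Int) - 0).toNat = 2000 from rfl, List.foldl_map]
  rw [bFold s0 totals 2000]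
  rw [partB_finish, stateAt]

-- ===== VERDICT (by name: the statement is the Claim_ definition above) =====
theorem part2_spec : Claim_equal_part2 := by
  intro secrets _ _
  unfold Spec_part2 part2 part2_alt
  have h : partA_seed = partB_seed := by
    funext t s; rw [seedA, seedB]
  rw [h]
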